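-- pv_equiv track=rewrite | github.com/m3ntorsky/swiftlys2 | generator/schema_generator/field_name_convertor.py | convert_field_name
-- ===== SOURCE A (Python) =====
-- type_prefixes = [
--     "psz",
--     "fl",
--     "a",
--     "n",
--     "i",
--     "isz",
--     "vec",
--     "us",
--     "u",
--     "ub",
--     "un",
--     "sz",
--     "b",
--     "f",
--     "clr",
--     "h",
--     "ang",
--     "af",
--     "ch",
--     "q",
--     "p",
--     "v",
--     "arr",
--     "bv",
--     "e",
--     "s",
-- ]
--
-- def convert_field_name(field_name: str) -> str:
--   field_name = field_name.removeprefix("m_")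
--
--   for prefix in type_prefixes:
--     if field_name.startswith(prefix):
--       temp_removed = field_name.removeprefix(prefix)
--       if len(temp_removed) > 0 and temp_removed[0].isupper():
--         return temp_removed
--
--   field_name = field_name[0].upper() + field_name[1:]
--   return field_name
-- ===== SOURCE B (Python) =====
-- type_prefixes = [
--     "psz", "fl", "a", "n", "i", "isz", "vec", "us", "u", "ub", "un", "sz",
--     "b", "f", "clr", "h", "ang", "af", "ch", "q", "p", "v", "arr", "bv",
--     "e", "s",
-- ]
--
-- _prefix_set = frozenset(type_prefixes)
--
--
-- def convert_field_name(field_name: str) -> str: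
--   if field_name.startswith("m_"):
--     field_name = field_name[2:]
--
--   # walk the name char by char, accumulating the candidate prefix; the first
--   # uppercase char is the only place a known lowercase type prefix could end
--   acc = []
--   for i, c in enumerate(field_name):
--     if c.isupper():
--       if "".join(acc) in _prefix_set:
--         return field_name[i:]
--       break
--     acc.append(c)
--
--   return field_name[0].upper() + field_name[1:]
-- ===== Notes on version B (the rewrite author's own statement) =====
-- stated objective: alternative
-- what changed: Replaces A's 26-iteration startswith/removeprefix loop over the prefix list by a single character walk that accumulates the lowercase run up to the first uppercase character and does one frozenset membership test there.
import Mathlib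
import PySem

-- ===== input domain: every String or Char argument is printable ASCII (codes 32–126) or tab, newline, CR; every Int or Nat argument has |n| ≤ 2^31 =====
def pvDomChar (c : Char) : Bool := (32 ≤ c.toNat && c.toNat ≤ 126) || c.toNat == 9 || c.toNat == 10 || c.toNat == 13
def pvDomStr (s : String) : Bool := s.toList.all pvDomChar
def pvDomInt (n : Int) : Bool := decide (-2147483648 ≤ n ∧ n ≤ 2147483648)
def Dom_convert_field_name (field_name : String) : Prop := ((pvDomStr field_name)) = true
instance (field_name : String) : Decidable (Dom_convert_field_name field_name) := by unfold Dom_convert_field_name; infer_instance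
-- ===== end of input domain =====

-- B replaces A's 26-iteration prefix loop by one char-by-char walk accumulating the lowercase run up to the first uppercase char plus a single set lookup; equal wherever A returns.

set_option maxRecDepth 4096


-- ===== PORT A =====
-- the module constant type_prefixes
def pvTypePrefixes : List (List Char) :=
  [['p','s','z'], ['f','l'], ['a'], ['n'], ['i'], ['i','s','z'],
   ['v','e','c'], ['u','s'], ['u'], ['u','b'], ['u','n'], ['s','z'],
   ['b'], ['f'], ['c','l','r'], ['h'], ['a','n','g'], ['a','f'],
   ['c','h'], ['q'], ['p'], ['v'], ['a','r','r'], ['b','v'],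
   ['e'], ['s']]

-- field_name.removeprefix("m_")
def pvStripM (s : List Char) : List Char :=
  if PySem.Chars.startswith s ['m','_'] then s.drop (['m','_'] : List Char).length else s

-- field_name[0].upper() + field_name[1:] (on [] Python raises IndexError — excluded by Pre_)
def pvCapitalize (s : List Char) : List Char :=
  match s with
  | [] => []
  | c :: cs => PySem.Chars.upperChar c :: cs

-- A's for-loop: first prefix with startswith and an uppercase char right after it
def pvLoopA : List (List Char) → List Char → Option (List Char)
  | [], _ => none
  | p :: rest, s =>
    if PySem.Chars.startswith s p then
      match s.drop p.length with
      | c :: cs => if PySem.Chars.isupper c then some (c :: cs) else pvLoopA rest s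
      | [] => pvLoopA rest s
    else pvLoopA rest s

def convert_field_name (field_name : String) : String :=
  match pvLoopA pvTypePrefixes (pvStripM field_name.toList) with
  | some t => String.ofList t
  | none => String.ofList (pvCapitalize (pvStripM field_name.toList))

-- ===== PORT B =====
-- _prefix_set = frozenset(type_prefixes)
def pvPrefixSet : PySem.Set (List Char) := PySem.Set.ofList pvTypePrefixes

-- B's while-loop: walk rest, growing acc with each non-uppercase char; at the
-- first uppercase char test acc against the prefix set
def pvWalkB (acc : List Char) : List Char → Option (List Char)
  | [] => none
  | c :: cs =>
    if PySem.Chars.isupper c then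
      if acc ∈ pvPrefixSet then some (c :: cs) else none
    else pvWalkB (acc ++ [c]) cs

def convert_field_name_alt (field_name : String) : String :=
  let name :=
    if PySem.Chars.startswith field_name.toList ['m','_'] then field_name.toList.drop 2
    else field_name.toList
  match pvWalkB [] name with
  | some t => String.ofList t
  | none =>
    match name with
    | [] => ""   -- unreachable under Pre_: Python raises IndexError here
    | c :: cs => String.ofList (PySem.Chars.upperChar c :: cs)

-- ===== PRECONDITION & SPEC =====
-- Pre_ excludes the inputs whose name is empty after stripping the member prefix: there A's field_name[0] raises IndexError (B raises there too).
def Pre_convert_field_name (field_name : String) : Prop :=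
  field_name ≠ "" ∧ field_name ≠ "m_"
instance (field_name : String) : Decidable (Pre_convert_field_name field_name) := by
  unfold Pre_convert_field_name; infer_instance

def pvWitness_convert_field_name : String := "m_flHealth"

def Spec_convert_field_name (field_name : String) (out : String) : Prop := out = convert_field_name_alt field_name
instance (field_name : String) (out : String) : Decidable (Spec_convert_field_name field_name out) := by unfold Spec_convert_field_name; infer_instance

-- ===== CLAIM (what is proved, stated in full; the proofs are below) =====
def Claim_equal_convert_field_name : Prop := ∀ (field_name : String), Dom_convert_field_name field_name → Pre_convert_field_name field_name → Spec_convert_field_name field_name (convert_field_name field_name)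

-- ===== LEMMAS AND PROOFS =====

-- every char of every known type prefix is non-uppercase
theorem pvPrefixes_lower : ∀ p ∈ pvTypePrefixes, ∀ c ∈ p, PySem.Chars.isupper c = false := by
  have h : pvTypePrefixes.all (fun p => p.all (fun c => !PySem.Chars.isupper c)) = true := by rfl
  intro p hp c hc
  have h1 := (List.all_eq_true.mp h) p hp
  have h2 := (List.all_eq_true.mp h1) c hc
  simpa using h2

-- A's loop over a list of all-lowercase prefixes returns exactly: at the first
-- uppercase position i, some (s.drop i) iff s.take i is a known prefix.
theorem pvLoopA_eq (L : List (List Char))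
    (hL : ∀ p ∈ L, ∀ c ∈ p, PySem.Chars.isupper c = false) (s : List Char) :
    pvLoopA L s =
      match s.findIdx? PySem.Chars.isupper with
      | some i => if s.take i ∈ L then some (s.drop i) else none
      | none => none := by
  induction L with
  | nil =>
    cases h : s.findIdx? PySem.Chars.isupper <;> simp [pvLoopA]
  | cons p rest ih =>
    have hp : ∀ c ∈ p, PySem.Chars.isupper c = false := hL p (by simp)
    have hrest := ih (fun q hq => hL q (by simp [hq]))
    cases hFI : s.findIdx? PySem.Chars.isupper with
    | none =>
      have hnone : ∀ x ∈ s, PySem.Chars.isupper x = false :=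
        List.findIdx?_eq_none_iff.mp hFI
      rw [hFI] at hrest
      simp only [pvLoopA]
      split
      · cases hd : s.drop p.length with
        | nil => simpa [hd] using hrest
        | cons c cs =>
          have hc : c ∈ s := by
            have : c ∈ s.drop p.length := by simp [hd]
            exact List.mem_of_mem_drop this
          simp [hnone c hc, hrest]
      · simp [hrest]
    | some i =>
      obtain ⟨hi, hup, hbefore⟩ := List.findIdx?_eq_some_iff_getElem.mp hFI
      rw [hFI] at hrest
      by_cases hpe : s.take i = p
      · have hplen : p.length = i := by
          rw [← hpe, List.length_take]; omega
        have hsw : PySem.Chars.startswith s p = true :=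
          (PySem.Chars.startswith_iff s p).mpr ⟨s.drop i, by rw [← hpe]; simp⟩
        have hdropi : s.drop i = s[i] :: s.drop (i + 1) := List.drop_eq_getElem_cons hi
        have hmm : s.take i ∈ p :: rest := by simp [hpe]
        simp only [pvLoopA]
        simp only [hsw, if_true]
        simp only [hplen, hdropi]
        simp only [hup, if_true]
        simp only [hmm, if_true]
      · have hskip : pvLoopA (p :: rest) s = pvLoopA rest s := by
          simp only [pvLoopA]
          split
          · next hsw =>
            have hpre : p <+: s := (PySem.Chars.startswith_iff s p).mp hsw
            have hlen : p.length ≤ s.length := hpre.length_le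
            have htk : s.take p.length = p := List.prefix_iff_eq_take.mp hpre |>.symm
            have hne : p.length ≠ i := fun h => hpe (h ▸ htk)
            rcases Nat.lt_or_ge p.length i with hlt | hge
            · have hdrop : s.drop p.length = s[p.length]'(by omega) :: s.drop (p.length + 1) :=
                List.drop_eq_getElem_cons (by omega)
              have hfalse : PySem.Chars.isupper (s[p.length]'(by omega)) = false := by
                simpa using hbefore p.length hlt
              simp only [hdrop]
              simp only [hfalse, Bool.false_eq_true, if_false]
            · exfalso
              have hlt' : i < p.length := by omega
              have hlen2 : i < (s.take p.length).length := by
                simp only [List.length_take]; omega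
              have hmem : s[i] ∈ p := by
                have h1 : s[i] ∈ s.take p.length := by
                  have h2 : (s.take p.length)[i]'hlen2 ∈ s.take p.length := List.getElem_mem hlen2
                  simpa [List.getElem_take] using h2
                rwa [htk] at h1
              exact absurd hup (by simp [hp s[i] hmem])
          · rfl
        rw [hskip, hrest]
        have : (s.take i ∈ p :: rest) ↔ (s.take i ∈ rest) := by simp [hpe]
        simp [this]

-- B's walk returns: at the first uppercase position i, some (s.drop i) iff
-- acc ++ s.take i is in the prefix set.
theorem pvWalkB_eq (s : List Char) : ∀ acc,
    pvWalkB acc s =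
      match s.findIdx? PySem.Chars.isupper with
      | some i => if acc ++ s.take i ∈ pvPrefixSet then some (s.drop i) else none
      | none => none := by
  induction s with
  | nil => intro acc; simp [pvWalkB]
  | cons c cs ih =>
    intro acc
    by_cases hc : PySem.Chars.isupper c = true
    · simp [pvWalkB, hc, List.findIdx?_cons]
    · rw [List.findIdx?_cons]
      simp only [hc]
      rw [show pvWalkB acc (c :: cs) = pvWalkB (acc ++ [c]) cs by
        simp [pvWalkB, hc]]
      rw [ih (acc ++ [c])]
      cases h : cs.findIdx? PySem.Chars.isupper with
      | none => simp
      | some i => simp [List.append_assoc]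

-- ===== VERDICT (by name: the statement is the Claim_ definition above) =====
theorem convert_field_name_spec : Claim_equal_convert_field_name := by
  intro fn _ _
  unfold Spec_convert_field_name convert_field_name convert_field_name_alt
  simp only [pvStripM, List.length_cons, List.length_nil]
  generalize (if PySem.Chars.startswith fn.toList ['m','_'] then fn.toList.drop 2
      else fn.toList) = s
  rw [pvLoopA_eq pvTypePrefixes pvPrefixes_lower, pvWalkB_eq s []]
  cases h : s.findIdx? PySem.Chars.isupper with
  | none => cases s <;> rfl
  | some i =>
    simp only [List.nil_append]
    by_cases hm : s.take i ∈ pvTypePrefixes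
    · simp [pvPrefixSet, PySem.Set.mem_ofList, hm]
    · simp [pvPrefixSet, PySem.Set.mem_ofList, hm]
      cases s <;> rfl
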